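-- pv_equiv track=rewrite | github.com/pypi-data/pypi-mirror-247 | packages/premium/premium-23.12.18.18-py3-none-any.whl/premium/preprocessing/ner.py | bio_to_bieo
-- ===== SOURCE A (Python) =====
-- from typing import Dict, List, Tuple, Union
--
-- def bio_to_bieo(bio: List[str]) -> List[str]:
--     # Convert sequence from BISO to BISEO,
--     # assume both of have `S` tag.
--     bieo = []
--     for i, tag in enumerate(bio):
--         if tag in ('B', 'O', 'S'):
--             bieo.append(tag)
--         else:
--             if i + 1 < len(bio) and bio[i + 1] == 'I':
--                 bieo.append('I')
--             else:
--                 bieo.append('E')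
--     return bieo
-- ===== SOURCE B (Python) =====
-- from typing import Dict, List, Tuple, Union
--
-- def bio_to_bieo(bio: List[str]) -> List[str]:
--     # Right-to-left single pass: thread the ORIGINAL tag of the element just
--     # processed instead of looking ahead with bio[i + 1].
--     out = []
--     next_tag = None
--     for tag in reversed(bio):
--         if tag in ('B', 'O', 'S'):
--             out.append(tag)
--         else:
--             out.append('I' if next_tag == 'I' else 'E')
--         next_tag = tag
--     out.reverse()
--     return out
-- ===== Notes on version B (the rewrite author's own statement) =====
-- stated objective: alternative
-- what changed: Replaces the forward enumerate loop with bio[i+1] lookahead by a right-to-left pass that threads the original tag of the previously processed element and reverses the accumulator at the end.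
import Mathlib
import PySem

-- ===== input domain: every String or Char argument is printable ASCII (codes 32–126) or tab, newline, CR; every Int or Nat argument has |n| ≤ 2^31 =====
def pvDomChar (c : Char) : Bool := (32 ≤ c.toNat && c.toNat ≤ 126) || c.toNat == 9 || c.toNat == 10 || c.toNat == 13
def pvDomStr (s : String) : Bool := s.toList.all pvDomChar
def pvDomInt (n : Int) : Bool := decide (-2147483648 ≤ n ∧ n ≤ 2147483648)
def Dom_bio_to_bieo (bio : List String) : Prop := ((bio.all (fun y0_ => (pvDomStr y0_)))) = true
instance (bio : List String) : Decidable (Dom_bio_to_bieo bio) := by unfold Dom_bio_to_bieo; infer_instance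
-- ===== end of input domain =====

-- B replaces A's forward lookahead (bio[i+1]) by a right-to-left pass threading the previous original tag; alternative decomposition, same cost.


-- ===== PORT A =====
def bio_to_bieo (bio : List String) : List String :=
  (PySem.List.enumerate bio 0).foldl
    (fun bieo p =>
      if p.2 = "B" ∨ p.2 = "O" ∨ p.2 = "S" then bieo ++ [p.2]
      else if p.1 + 1 < (bio.length : Int) ∧ PySem.List.pyGet? bio (p.1 + 1) = some "I"
        then bieo ++ ["I"]
        else bieo ++ ["E"]) []

-- ===== PORT B =====
def bio_to_bieo_alt (bio : List String) : List String :=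
  let r := bio.reverse.foldl
    (fun (st : List String × Option String) tag =>
      (st.1 ++ [if tag = "B" ∨ tag = "O" ∨ tag = "S" then tag
                else if st.2 = some "I" then "I" else "E"],
       some tag))
    ([], none)
  r.1.reverse

-- ===== PRECONDITION & SPEC =====
def Spec_bio_to_bieo (bio : List String) (out : List String) : Prop := out = bio_to_bieo_alt bio
instance (bio : List String) (out : List String) : Decidable (Spec_bio_to_bieo bio out) := by unfold Spec_bio_to_bieo; infer_instance

-- ===== CLAIM (what is proved, stated in full; the proofs are below) =====
def Claim_equal_bio_to_bieo : Prop := ∀ (bio : List String), Dom_bio_to_bieo bio → Spec_bio_to_bieo bio (bio_to_bieo bio)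

-- ===== LEMMAS AND PROOFS =====

/-- Common reference function: output of both programs, position by position. -/
def pvRef : List String → List String
  | [] => []
  | t :: rest =>
      (if t = "B" ∨ t = "O" ∨ t = "S" then t
       else if rest.head? = some "I" then "I" else "E") :: pvRef rest

/-- A's fold over the enumerated suffix starting at index k. -/
lemma pvA_gen (full : List String) : ∀ (suf : List String) (k : Nat) (acc : List String),
    full.drop k = suf →
    (PySem.List.enumerate suf (k : Int)).foldl
      (fun bieo p =>
        if p.2 = "B" ∨ p.2 = "O" ∨ p.2 = "S" then bieo ++ [p.2]
        else if p.1 + 1 < (full.length : Int) ∧ PySem.List.pyGet? full (p.1 + 1) = some "I"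
          then bieo ++ ["I"]
          else bieo ++ ["E"]) acc = acc ++ pvRef suf := by
  intro suf
  induction suf with
  | nil => intro k acc _; simp [PySem.List.enumerate, pvRef]
  | cons t rest ih =>
      intro k acc hdrop
      have hk : k < full.length := by
        by_contra h
        have : full.drop k = [] := List.drop_eq_nil_of_le (by omega)
        simp [this] at hdrop
      have hrest : full.drop (k + 1) = rest := by
        have h1 : (full.drop k).drop 1 = full.drop (k + 1) := by rw [List.drop_drop]
        rw [← h1, hdrop]
        simp
      have hget : PySem.List.pyGet? full ((k : Int) + 1) = full[k + 1]? := by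
        have : ((k : Int) + 1) = ((k + 1 : Nat) : Int) := by push_cast; ring
        rw [this, PySem.List.pyGet?_natCast]
      have hhead : full[k + 1]? = rest.head? := by
        rw [← List.head?_drop, hrest]
      have hlen : ((k : Int) + 1 < (full.length : Int)) ↔ rest ≠ [] := by
        constructor
        · intro h hnil
          have : full.drop (k + 1) = [] := by rw [hrest, hnil]
          have := List.drop_eq_nil_iff.mp this
          omega
        · intro h
          have : full.drop (k + 1) ≠ [] := by rw [hrest]; exact h
          have := List.drop_eq_nil_iff.not.mp this
          omega
      rw [PySem.List.enumerate_cons]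
      simp only [List.foldl_cons]
      have hstep : ∀ b : List String,
          (if t = "B" ∨ t = "O" ∨ t = "S" then b ++ [t]
           else if (k : Int) + 1 < (full.length : Int) ∧
                    PySem.List.pyGet? full ((k : Int) + 1) = some "I"
             then b ++ ["I"] else b ++ ["E"]) =
          b ++ [if t = "B" ∨ t = "O" ∨ t = "S" then t
                else if rest.head? = some "I" then "I" else "E"] := by
        intro b
        by_cases hb : t = "B" ∨ t = "O" ∨ t = "S"
        · simp [hb]
        · simp only [hb, if_false]
          by_cases hI : rest.head? = some "I"
          · have hne : rest ≠ [] := by intro h; simp [h] at hI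
            simp [hget, hhead, hI, hlen.mpr hne]
          · have : ¬ ((k : Int) + 1 < (full.length : Int) ∧
                PySem.List.pyGet? full ((k : Int) + 1) = some "I") := by
              rintro ⟨_, h2⟩
              rw [hget, hhead] at h2
              exact hI h2
            simp [this, hI]
      rw [hstep]
      have := ih (k + 1) (acc ++ [if t = "B" ∨ t = "O" ∨ t = "S" then t
                else if rest.head? = some "I" then "I" else "E"]) hrest
      rw [show ((k : Int) + 1) = ((k + 1 : Nat) : Int) by push_cast; ring]
      rw [this, pvRef]
      simp

/-- next original tag seen by B's backward pass after a suffix `l`, initial `nt`. -/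
def pvNxt : List String → Option String → Option String
  | [], nt => nt
  | r :: _, _ => some r

/-- reference for B's backward pass with arbitrary initial next-tag. -/
def pvRefG : List String → Option String → List String
  | [], _ => []
  | t :: rest, nt =>
      (if t = "B" ∨ t = "O" ∨ t = "S" then t
       else if pvNxt rest nt = some "I" then "I" else "E") :: pvRefG rest nt

lemma pvB_gen : ∀ (l acc : List String) (nt : Option String),
    l.reverse.foldl
      (fun (st : List String × Option String) tag =>
        (st.1 ++ [if tag = "B" ∨ tag = "O" ∨ tag = "S" then tag
                  else if st.2 = some "I" then "I" else "E"],
         some tag)) (acc, nt) = (acc ++ (pvRefG l nt).reverse, pvNxt l nt) := by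
  intro l
  induction l with
  | nil => intro acc nt; simp [pvRefG, pvNxt]
  | cons t rest ih =>
      intro acc nt
      rw [List.reverse_cons, List.foldl_append, ih acc nt]
      simp only [List.foldl_cons, List.foldl_nil, pvRefG, pvNxt, List.reverse_cons,
        List.append_assoc]
      rfl

lemma pvRefG_none (l : List String) : pvRefG l none = pvRef l := by
  induction l with
  | nil => rfl
  | cons t rest ih =>
      rw [pvRefG, pvRef, ih]
      congr 1
      cases rest <;> simp [pvNxt]

-- ===== VERDICT (by name: the statement is the Claim_ definition above) =====
theorem bio_to_bieo_spec : Claim_equal_bio_to_bieo := by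
  intro bio _
  unfold Spec_bio_to_bieo bio_to_bieo bio_to_bieo_alt
  have hA := pvA_gen bio bio 0 [] (by simp)
  norm_num at hA
  rw [hA, pvB_gen bio [] none, pvRefG_none]
  simp
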